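-- pv_equiv track=rewrite | github.com/DangTus/python.tu-toan | python.xep-lich/thuat_toan_2.py | check_vong_dau
-- ===== SOURCE A (Python) =====
-- def check_vong_dau(m, vong):
--     if not vong:
--         return False
--     else:
--         for tran_dau_trong_vong in vong:
--             for team in m:
--                 if team in tran_dau_trong_vong:
--                     return True
--         return False
-- ===== SOURCE B (Python) =====
-- def check_vong_dau(m, vong):
--     all_teams = set()
--     for match in vong:
--         all_teams.update(match)
--     return any(t in all_teams for t in m)
-- ===== Notes on version B (the rewrite author's own statement) =====
-- stated objective: idiomatic
-- what changed: B first unions all matches into one set of teams in a single pass, then does one overlap test of m against that set, instead of A's nested scan of every team of m against every match.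
import Mathlib
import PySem

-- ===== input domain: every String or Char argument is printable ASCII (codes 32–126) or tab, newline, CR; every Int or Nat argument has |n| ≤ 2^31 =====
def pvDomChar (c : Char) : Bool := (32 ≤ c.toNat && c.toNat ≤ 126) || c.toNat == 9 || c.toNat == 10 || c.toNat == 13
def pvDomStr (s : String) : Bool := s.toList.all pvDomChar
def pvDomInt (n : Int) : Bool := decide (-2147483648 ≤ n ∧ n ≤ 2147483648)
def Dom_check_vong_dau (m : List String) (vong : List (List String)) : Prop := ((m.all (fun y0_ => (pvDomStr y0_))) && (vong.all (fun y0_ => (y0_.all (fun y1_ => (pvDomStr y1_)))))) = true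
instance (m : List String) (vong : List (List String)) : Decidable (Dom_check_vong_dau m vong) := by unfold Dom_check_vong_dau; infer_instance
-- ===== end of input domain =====

-- B builds the set of all teams occurring in any match in one pass, then tests m for overlap with it (idiomatic restructuring; same result).
-- ===== PORT A =====
-- inner loop: 'for team in m: if team in tran: return True'
def pvInnerA (tran : List String) : List String → Bool
  | [] => false
  | team :: rest => if tran.contains team then true else pvInnerA tran rest

-- outer loop: 'for tran_dau_trong_vong in vong: …'
def pvOuterA (m : List String) : List (List String) → Bool
  | [] => false
  | tran :: rest => if pvInnerA tran m then true else pvOuterA m rest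

def check_vong_dau (m : List String) (vong : List (List String)) : Bool :=
  if vong = [] then false else pvOuterA m vong

-- ===== PORT B =====
def check_vong_dau_alt (m : List String) (vong : List (List String)) : Bool :=
  let all_teams : PySem.Set String :=
    vong.foldl (fun s mtch => PySem.Set.update s mtch) PySem.Set.empty
  m.any (fun t => PySem.Set.contains all_teams t)

-- ===== PRECONDITION & SPEC =====
def Spec_check_vong_dau (m : List String) (vong : List (List String)) (out : Bool) : Prop := out = check_vong_dau_alt m vong
instance (m : List String) (vong : List (List String)) (out : Bool) : Decidable (Spec_check_vong_dau m vong out) := by unfold Spec_check_vong_dau; infer_instance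

-- ===== CLAIM (what is proved, stated in full; the proofs are below) =====
def Claim_equal_check_vong_dau : Prop := ∀ (m : List String) (vong : List (List String)), Dom_check_vong_dau m vong → Spec_check_vong_dau m vong (check_vong_dau m vong)

-- ===== LEMMAS AND PROOFS =====

-- ===== VERDICT (by name: the statement is the Claim_ definition above) =====
lemma pvInnerA_eq (tran : List String) (m : List String) :
    pvInnerA tran m = m.any (fun t => tran.contains t) := by
  induction m with
  | nil => rfl
  | cons x xs ih => cases h : tran.contains x <;> simp [pvInnerA, h, ih]

lemma mem_foldl_update (vong : List (List String)) (s : PySem.Set String) (t : String) :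
    t ∈ vong.foldl (fun s mtch => PySem.Set.update s mtch) s ↔ t ∈ s ∨ ∃ tran ∈ vong, t ∈ tran := by
  induction vong generalizing s with
  | nil => simp
  | cons v vs ih => simp [List.foldl_cons, ih, PySem.Set.mem_update]; tauto

lemma pvOuterA_iff (m : List String) (vong : List (List String)) :
    pvOuterA m vong = true ↔ ∃ tran ∈ vong, ∃ t ∈ m, tran.contains t := by
  induction vong with
  | nil => simp [pvOuterA]
  | cons v vs ih =>
    simp only [pvOuterA]
    split_ifs with h
    · simp only [pvInnerA_eq, List.any_eq_true] at h
      simp only [true_iff]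
      exact ⟨v, by simp, h⟩
    · simp only [pvInnerA_eq, List.any_eq_true] at h
      simp at h
      simp [ih]
      tauto

theorem check_vong_dau_spec : Claim_equal_check_vong_dau := by
  intro m vong _
  unfold Spec_check_vong_dau check_vong_dau check_vong_dau_alt
  by_cases hv : vong = []
  · simp [hv]
  · simp only [hv, if_false]
    rw [Bool.eq_iff_iff, pvOuterA_iff, List.any_eq_true]
    constructor
    · rintro ⟨tran, htran, t, htm, hc⟩
      refine ⟨t, htm, ?_⟩
      rw [PySem.Set.contains_iff, mem_foldl_update]
      exact Or.inr ⟨tran, htran, by simpa using hc⟩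
    · rintro ⟨t, htm, hc⟩
      rw [PySem.Set.contains_iff, mem_foldl_update] at hc
      rcases hc with h | ⟨tran, htran, ht⟩
      · simp [PySem.Set.empty] at h
      · exact ⟨tran, htran, t, htm, by simpa⟩
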